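-- pv_equiv track=rewrite | github.com/RuairiB/advent-of-code-py | aoc2025/day_6/day_6.py | parse_rows
-- ===== SOURCE A (Python) =====
-- def parse_rows(raw_input: list[str]) -> list[list[str]]:
--     """
--     transpose & split appropriately:
--     [
--       "123 328  51 64 ",
--       " 45 64  387 23 ",
--       "  6 98  215 314",
--       "*   +   *   +  "
--     ]
--     -> [
--       ["123", " 45", "  6", "*  "],
--       ["328", "64 ", "98 ", "+  "],
--       [" 51", "387", "215", "*  "],
--       ["64 ", "23 ", "314", "+  "],
--     ]
--     """
--     col_width: list[int] = list(
--         map(int, list(map(max, map(list, zip(*[map(len, r.split()) for r in raw_input[:-1]])))))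
--     )
--     n = len(raw_input[0].split())
--
--     new_cols = [["" for _ in range(len(raw_input))] for _ in range(n)]
--     pos = 0
--     for c in range(n):
--         for r in range(len(raw_input)):
--             new_cols[c][r] = raw_input[r][pos : pos + col_width[c]]
--         pos += col_width[c] + 1
--
--     return new_cols
-- ===== SOURCE B (Python) =====
-- def parse_rows(raw_input: list[str]) -> list[list[str]]:
--     """Peel cells off shrinking row suffixes; widths by an elementwise-max merge fold."""
--     rows = raw_input[:-1]
--     if rows:
--         widths = [len(w) for w in rows[0].split()]
--         for r in rows[1:]:
--             widths = [max(a, b) for a, b in zip(widths, (len(w) for w in r.split()))]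
--     else:
--         widths = []
--     n = len(raw_input[0].split())
--     out = []
--     tails = raw_input
--     for w in widths[:n]:
--         out.append([t[:w] for t in tails])
--         tails = [t[w + 1:] for t in tails]
--     return out
-- ===== Notes on version B (the rewrite author's own statement) =====
-- stated objective: alternative
-- what changed: B never computes column start offsets or indexes a preallocated matrix: it peels the output column by column off a list of shrinking row suffixes (take w, then drop w+1 from every tail), and gets the widths by an elementwise-max merge fold over the rows' word-length lists instead of A's zip(*)/map(max) transpose.
import Mathlib
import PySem

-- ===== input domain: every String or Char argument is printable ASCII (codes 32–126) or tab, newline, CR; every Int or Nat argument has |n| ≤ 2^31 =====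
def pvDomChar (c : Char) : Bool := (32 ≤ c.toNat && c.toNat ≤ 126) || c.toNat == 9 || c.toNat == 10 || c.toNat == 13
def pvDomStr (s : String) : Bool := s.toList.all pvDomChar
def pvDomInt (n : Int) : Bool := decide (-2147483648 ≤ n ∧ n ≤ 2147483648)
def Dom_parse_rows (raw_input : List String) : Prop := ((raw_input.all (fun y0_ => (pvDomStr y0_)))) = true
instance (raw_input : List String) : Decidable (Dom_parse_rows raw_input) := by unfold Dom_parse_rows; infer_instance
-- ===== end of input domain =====

-- B peels the output column by column off a list of shrinking row suffixes (no start
-- offsets, no preallocated matrix) and merges widths by an elementwise-max fold;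
-- alternative decomposition, same cost.

-- zip(*ls): the i-th output is the list of the i-th elements, i below the minimum length.
-- The default d is never read: every index i is below every list's length.
def pyZipStar {α : Type} (d : α) (ls : List (List α)) : List (List α) :=
  match ls with
  | [] => []
  | l0 :: rest =>
    (List.range (rest.foldl (fun m l => min m l.length) l0.length)).map
      (fun i => ls.map (fun l => l.getD i d))

-- ===== PORT A =====
def parse_rows (raw_input : List String) : List (List String) :=
  -- [map(len, r.split()) for r in raw_input[:-1]]
  let wordLens : List (List Nat) :=
    raw_input.dropLast.map (fun r => (PySem.Str.split₀ r).map (fun w => w.toList.length))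
  -- list(map(int, map(max, map(list, zip(*wordLens))))): int() is the identity on ints;
  -- max of each tuple as foldl max 0 — exact: every tuple is nonempty and lengths are ≥ 0
  let col_width : List Nat := (pyZipStar 0 wordLens).map (fun col => col.foldl max 0)
  let n : Nat := (PySem.Str.split₀ (raw_input.headD "")).length  -- raw_input[0]; Pre_ excludes []
  let new_cols : List (List String) :=
    (List.range n).map (fun _ => (List.range raw_input.length).map (fun _ => ""))
  -- for c in range(n): for r in range(len(raw_input)): …; pos += col_width[c] + 1
  -- col_width[c] as getD: Pre_ guarantees c < len(col_width), where Python would raise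
  let res := (List.range n).foldl (fun (st : List (List String) × Nat) c =>
      let w := col_width.getD c 0
      ((List.range raw_input.length).foldl (fun cols r =>
          cols.set c ((cols.getD c []).set r
            (PySem.Str.slice (raw_input.getD r "") (some (st.2 : Int))
              (some ((st.2 : Int) + (w : Int)))))) st.1,
       st.2 + w + 1)) (new_cols, 0)
  res.1

-- ===== PORT B =====
def parse_rows_alt (raw_input : List String) : List (List String) :=
  let rows := raw_input.dropLast  -- raw_input[:-1]
  -- widths: elementwise-max merge fold over the rows' word-length lists (zip truncates)
  let widths : List Nat :=
    match rows with
    | [] => []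
    | r0 :: rest =>
      rest.foldl (fun ws r =>
          List.zipWith (fun a b => max a b) ws
            ((PySem.Str.split₀ r).map (fun w => w.toList.length)))
        ((PySem.Str.split₀ r0).map (fun w => w.toList.length))
  let n : Nat := (PySem.Str.split₀ (raw_input.headD "")).length  -- raw_input[0]; Pre_ excludes []
  -- for w in widths[:n]: out.append([t[:w] for t in tails]); tails = [t[w+1:] for t in tails]
  let res := (widths.take n).foldl
    (fun (st : List (List String) × List String) (w : Nat) =>
      (st.1 ++ [st.2.map (fun t => PySem.Str.slice t none (some (w : Int)))],
       st.2.map (fun t => PySem.Str.slice t (some ((w : Int) + 1)) none)))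
    (([] : List (List String)), raw_input)
  res.1

-- ===== PRECONDITION & SPEC =====
-- Pre_ is exactly where Python A returns: a nonempty input whose first row's word count
-- does not exceed any other counted row's word count (otherwise A raises IndexError).
def Pre_parse_rows (raw_input : List String) : Prop :=
  raw_input ≠ [] ∧
  (raw_input.dropLast = [] → (PySem.Str.split₀ (raw_input.headD "")).length = 0) ∧
  ∀ r ∈ raw_input.dropLast,
    (PySem.Str.split₀ (raw_input.headD "")).length ≤ (PySem.Str.split₀ r).length
instance (raw_input : List String) : Decidable (Pre_parse_rows raw_input) := by
  unfold Pre_parse_rows; infer_instance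

def pvWitness_parse_rows : List String := ["123 328  51", " 45 64  387", "*   +   *  "]

def Spec_parse_rows (raw_input : List String) (out : List (List String)) : Prop :=
  out = parse_rows_alt raw_input
instance (raw_input : List String) (out : List (List String)) :
    Decidable (Spec_parse_rows raw_input out) := by unfold Spec_parse_rows; infer_instance

-- ===== CLAIM (what is proved, stated in full; the proofs are below) =====
def Claim_equal_parse_rows : Prop := ∀ (raw_input : List String), Dom_parse_rows raw_input →
  Pre_parse_rows raw_input → Spec_parse_rows raw_input (parse_rows raw_input)

-- ===== LEMMAS AND PROOFS =====

-- the column widths, start offsets and the common canonical result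
def colW (raw_input : List String) (c : Nat) : Nat :=
  (raw_input.dropLast.map (fun r => PySem.Str.split₀ r)).foldl
    (fun m wr => max m (wr.getD c "").toList.length) 0

def colS (raw_input : List String) : Nat → Nat
  | 0 => 0
  | k + 1 => colS raw_input k + colW raw_input k + 1

def canon (raw_input : List String) : List (List String) :=
  (List.range ((PySem.Str.split₀ (raw_input.headD "")).length)).map (fun c =>
    raw_input.map (fun r =>
      PySem.Str.slice r (some ((colS raw_input c : Nat) : Int))
        (some (((colS raw_input c : Nat) : Int) + ((colW raw_input c : Nat) : Int)))))

theorem getD_map_range {α : Type} (f : Nat → α) (d : α) {n c : Nat} (hc : c < n) :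
    ((List.range n).map f).getD c d = f c := by
  simp [List.getD, hc]

theorem map_getD_length {α β : Type} (l : List α) (d : α) (g : α → β) :
    (List.range l.length).map (fun r => g (l.getD r d)) = l.map g := by
  apply List.ext_getElem <;> simp [List.getD]
  intro i h1 h2
  simp [List.getElem?_eq_getElem h2]

theorem foldl_set_range {α : Type} (f : Nat → α) :
    ∀ (m : Nat) (l : List α), m ≤ l.length →
    (List.range m).foldl (fun l r => l.set r (f r)) l = (List.range m).map f ++ l.drop m := by
  intro m
  induction m with
  | zero => intro l _; simp
  | succ m ih =>
    intro l h
    rw [List.range_succ, List.foldl_append, ih l (by omega)]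
    have hlen : ((List.range m).map f).length = m := by simp
    have hm : m < l.length := by omega
    simp only [List.foldl_cons, List.foldl_nil]
    have hdrop : l.drop m = l[m] :: l.drop (m + 1) := (List.drop_eq_getElem_cons hm)
    rw [List.set_append_right _ _ (by omega), hdrop]
    simp only [hlen, Nat.sub_self, List.set_cons_zero, List.map_append, List.map_cons,
      List.map_nil, List.append_assoc, List.cons_append, List.nil_append]

theorem foldl_set_modify {α : Type} (g : Nat → List α → List α) :
    ∀ (rs : List Nat) (cols : List (List α)) (c : Nat), c < cols.length →
    rs.foldl (fun cols r => cols.set c (g r (cols.getD c []))) cols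
      = cols.set c (rs.foldl (fun col r => g r col) (cols.getD c [])) := by
  intro rs
  induction rs with
  | nil =>
    intro cols c hc
    apply List.ext_getElem (by simp)
    intro i h1 h2
    rw [List.getElem_set]
    split
    · next h => subst h; simp [List.getD, List.getElem?_eq_getElem hc]
    · rfl
  | cons r rs ih =>
    intro cols c hc
    simp only [List.foldl_cons]
    rw [ih _ c (by simpa using hc)]
    have hget : (cols.set c (g r (cols.getD c []))).getD c [] = g r (cols.getD c []) := by
      simp [List.getD, hc]
    rw [hget, List.set_set]

theorem set_map_range {α : Type} (f : Nat → α) (n k : Nat) (x : α) :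
    ((List.range n).map f).set k x
      = (List.range n).map (fun c => if c = k then x else f c) := by
  apply List.ext_getElem (by simp)
  intro i h1 h2
  rw [List.getElem_set]
  simp only [List.getElem_map, List.getElem_range]
  split
  · next h => simp [h]
  · next h => simp [Ne.symm h]

-- under Pre_, A's col_width agrees with colW on every column index below n
theorem colwidth_eq (raw_input : List String) (h : Pre_parse_rows raw_input) (c : Nat)
    (hc : c < (PySem.Str.split₀ (raw_input.headD "")).length) :
    ((pyZipStar 0 (raw_input.dropLast.map
        (fun r => (PySem.Str.split₀ r).map (fun w => w.toList.length)))).map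
      (fun col => col.foldl max 0)).getD c 0 = colW raw_input c := by
  obtain ⟨-, h1, h2⟩ := h
  set n := (PySem.Str.split₀ (raw_input.headD "")).length with hn
  cases hdl : raw_input.dropLast with
  | nil => have := h1 hdl; omega
  | cons r0 rest =>
    have hwc : ∀ r ∈ (r0 :: rest), n ≤ (PySem.Str.split₀ r).length := by
      intro r hr; exact h2 r (hdl ▸ hr)
    unfold colW pyZipStar
    rw [hdl]
    simp only [List.map_cons]
    have hm : n ≤ (rest.map (fun r => (PySem.Str.split₀ r).map (fun w => w.toList.length))).foldl
        (fun m l => min m l.length) ((PySem.Str.split₀ r0).map (fun w => w.toList.length)).length := by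
      rw [← List.foldl_map (f := fun l : List Nat => l.length) (g := min)]
      rcases PySem.List.foldl_min_mem
          ((rest.map (fun r => (PySem.Str.split₀ r).map (fun w => w.toList.length))).map
            (fun l : List Nat => l.length))
          ((PySem.Str.split₀ r0).map (fun w => w.toList.length)).length with hEq | hMem
      · rw [hEq]; simpa using hwc r0 (by simp)
      · obtain ⟨l, hl, hlEq⟩ := List.mem_map.1 hMem
        obtain ⟨r, hr, hrEq⟩ := List.mem_map.1 hl
        rw [← hlEq, ← hrEq]
        simpa using hwc r (by simp [hr])
    rw [List.map_map, getD_map_range _ _ (lt_of_lt_of_le hc hm)]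
    simp only [Function.comp]
    have hpt : ∀ r ∈ r0 :: rest, ((PySem.Str.split₀ r).map (fun w => w.toList.length)).getD c 0
        = ((PySem.Str.split₀ r).getD c "").toList.length := by
      intro r hr
      have hcr : c < (PySem.Str.split₀ r).length := lt_of_lt_of_le hc (hwc r hr)
      simp [List.getD, List.getElem?_eq_getElem hcr]
    simp only [List.foldl_cons, List.map_map]
    rw [List.foldl_map, List.foldl_map, hpt r0 (by simp)]
    apply PySem.List.foldl_congr_mem
    intro acc r hr
    simp only [Function.comp_apply]
    rw [hpt r (by simp [hr])]

-- A's outer loop invariant: after k columns, the first k columns hold their final value,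
-- the rest are still blank, and pos = colS k
theorem A_loop (raw_input : List String) (h : Pre_parse_rows raw_input) :
    ∀ k, k ≤ (PySem.Str.split₀ (raw_input.headD "")).length →
    (List.range k).foldl (fun (st : List (List String) × Nat) c =>
      let w : Nat := ((pyZipStar 0 (raw_input.dropLast.map
          (fun r => (PySem.Str.split₀ r).map (fun w => w.toList.length)))).map
            (fun col => col.foldl max 0)).getD c 0
      ((List.range raw_input.length).foldl (fun cols r =>
          cols.set c ((cols.getD c []).set r
            (PySem.Str.slice (raw_input.getD r "") (some (st.2 : Int))
              (some ((st.2 : Int) + (w : Int)))))) st.1,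
       st.2 + w + 1))
      ((List.range ((PySem.Str.split₀ (raw_input.headD "")).length)).map
        (fun _ => (List.range raw_input.length).map (fun _ => "")), 0)
    = ((List.range ((PySem.Str.split₀ (raw_input.headD "")).length)).map (fun c =>
        if c < k then raw_input.map (fun r =>
          PySem.Str.slice r (some ((colS raw_input c : Nat) : Int))
            (some (((colS raw_input c : Nat) : Int) + ((colW raw_input c : Nat) : Int))))
        else (List.range raw_input.length).map (fun _ => "")),
       colS raw_input k) := by
  intro k
  induction k with
  | zero =>
    intro _
    simp only [List.range_zero, List.foldl_nil, colS, Prod.mk.injEq]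
    constructor
    · apply List.map_congr_left; intro c _; simp
    · trivial
  | succ k ih =>
    intro hk1
    have hk : k < (PySem.Str.split₀ (raw_input.headD "")).length := hk1
    rw [List.range_succ, List.foldl_append, ih (Nat.le_of_lt hk)]
    simp only [List.foldl_cons, List.foldl_nil]
    rw [colwidth_eq raw_input h k hk]
    simp only [Prod.mk.injEq]
    refine ⟨?_, by simp [colS]⟩
    rw [foldl_set_modify (fun r col => col.set r
        (PySem.Str.slice (raw_input.getD r "") (some ((colS raw_input k : Nat) : Int))
          (some (((colS raw_input k : Nat) : Int) + ((colW raw_input k : Nat) : Int)))))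
      _ _ k (by simpa using hk)]
    rw [getD_map_range _ _ hk]
    simp only [lt_irrefl, if_false]
    rw [foldl_set_range _ raw_input.length _ (by simp)]
    rw [map_getD_length raw_input "" (fun s =>
      PySem.Str.slice s (some ((colS raw_input k : Nat) : Int))
        (some (((colS raw_input k : Nat) : Int) + ((colW raw_input k : Nat) : Int))))]
    rw [set_map_range]
    apply List.map_congr_left
    intro c hc
    simp only [List.mem_range] at hc
    by_cases hck : c = k
    · subst hck; simp
    · have : c < k ↔ c < k + 1 := by omega
      simp [hck, this]

-- ===== B-side lemmas =====

-- getD through the elementwise-max merge fold, at an index shorter than every list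
theorem zw_fold_len (rs : List (List Nat)) :
    ∀ (ws : List Nat) (n : Nat), n ≤ ws.length → (∀ l ∈ rs, n ≤ l.length) →
    n ≤ (rs.foldl (fun ws l => List.zipWith (fun a b => max a b) ws l) ws).length := by
  induction rs with
  | nil => intro ws n h _; simpa using h
  | cons l0 rs ih =>
    intro ws n h hall
    simp only [List.foldl_cons]
    apply ih
    · simp only [List.length_zipWith]
      exact le_min h (hall l0 (by simp))
    · intro l hl; exact hall l (by simp [hl])

theorem zw_fold_getD (rs : List (List Nat)) :
    ∀ (ws : List Nat) (c : Nat), c < ws.length → (∀ l ∈ rs, c < l.length) →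
    (rs.foldl (fun ws l => List.zipWith (fun a b => max a b) ws l) ws).getD c 0
      = rs.foldl (fun m l => max m (l.getD c 0)) (ws.getD c 0) := by
  induction rs with
  | nil => intro ws c _ _; rfl
  | cons l0 rs ih =>
    intro ws c hc hall
    have hl0 : c < l0.length := hall l0 (by simp)
    simp only [List.foldl_cons]
    rw [ih _ c (by simp [List.length_zipWith]; omega) (fun l hl => hall l (by simp [hl]))]
    congr 1
    have hcz : c < (List.zipWith (fun a b => max a b) ws l0).length := by
      simp [List.length_zipWith]; omega
    simp [List.getD, hc, hl0]

-- under Pre_, B's widths[:n] are exactly the canonical column widths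
theorem widths_take (raw_input : List String) (h : Pre_parse_rows raw_input)
    (r0 : String) (rest : List String) (hdl : raw_input.dropLast = r0 :: rest) :
    ((rest.foldl (fun ws r =>
        List.zipWith (fun a b => max a b) ws
          ((PySem.Str.split₀ r).map (fun w => w.toList.length)))
      ((PySem.Str.split₀ r0).map (fun w => w.toList.length))).take
        ((PySem.Str.split₀ (raw_input.headD "")).length))
    = (List.range ((PySem.Str.split₀ (raw_input.headD "")).length)).map
        (colW raw_input) := by
  obtain ⟨-, -, h2⟩ := h
  set n := (PySem.Str.split₀ (raw_input.headD "")).length with hn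
  have hwc : ∀ r ∈ (r0 :: rest), n ≤ (PySem.Str.split₀ r).length := by
    intro r hr; exact h2 r (hdl ▸ hr)
  have hlen : n ≤ (rest.foldl (fun ws r =>
      List.zipWith (fun a b => max a b) ws
        ((PySem.Str.split₀ r).map (fun w => w.toList.length)))
      ((PySem.Str.split₀ r0).map (fun w => w.toList.length))).length := by
    rw [← List.foldl_map (f := fun r => (PySem.Str.split₀ r).map (fun w => w.toList.length))
      (g := fun ws l => List.zipWith (fun a b => max a b) ws l)]
    apply zw_fold_len
    · simpa using hwc r0 (by simp)
    · intro l hl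
      obtain ⟨r, hr, hrEq⟩ := List.mem_map.1 hl
      rw [← hrEq]; simpa using hwc r (by simp [hr])
  apply List.ext_getElem
  · rw [List.length_take, List.length_map, List.length_range]; omega
  intro c h1 h2'
  have hc : c < n := by simpa using h2'
  rw [List.getElem_take, List.getElem_map, List.getElem_range]
  have hgetD : ∀ {l : List Nat} (hcl : c < l.length), l[c]'hcl = l.getD c 0 := by
    intro l hcl; simp [List.getD, List.getElem?_eq_getElem hcl]
  rw [hgetD]
  rw [← List.foldl_map (f := fun r => (PySem.Str.split₀ r).map (fun w => w.toList.length))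
    (g := fun ws l => List.zipWith (fun a b => max a b) ws l)]
  rw [zw_fold_getD]
  · -- pointwise: each getD is the word's length
    have hpt : ∀ r ∈ r0 :: rest, ((PySem.Str.split₀ r).map (fun w => w.toList.length)).getD c 0
        = ((PySem.Str.split₀ r).getD c "").toList.length := by
      intro r hr
      have hcr : c < (PySem.Str.split₀ r).length := lt_of_lt_of_le hc (hwc r hr)
      simp [List.getD, List.getElem?_eq_getElem hcr]
    unfold colW
    rw [hdl]
    simp only [List.map_cons, List.foldl_cons, List.foldl_map, hpt r0 (by simp),
      Nat.zero_max]
    apply PySem.List.foldl_congr_mem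
    intro acc r hr
    rw [hpt r (by simp [hr])]
  · exact lt_of_lt_of_le hc (by simpa using hwc r0 (by simp))
  · intro l hl
    obtain ⟨r, hr, hrEq⟩ := List.mem_map.1 hl
    rw [← hrEq]
    exact lt_of_lt_of_le hc (by simpa using hwc r (by simp [hr]))

-- the tails after k peeled columns: every row with its first colS k characters removed
def tailsAt (raw_input : List String) (k : Nat) : List String :=
  raw_input.map (fun r => PySem.Str.slice r (some ((colS raw_input k : Nat) : Int)) none)

theorem tailsAt_zero (raw_input : List String) : tailsAt raw_input 0 = raw_input := by
  have h : ∀ r : String, PySem.Str.slice r (some ((colS raw_input 0 : Nat) : Int)) none = r := by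
    intro r
    apply String.toList_inj.1
    simp only [PySem.Str.toList_slice, PySem.Chars.slice_eq_listSlice]
    rw [show ((colS raw_input 0 : Nat) : Int) = ((0 : Nat) : Int) from rfl,
      PySem.List.slice_from_natCast, List.drop_zero]
  unfold tailsAt
  calc raw_input.map (fun r => PySem.Str.slice r (some ((colS raw_input 0 : Nat) : Int)) none)
      = raw_input.map id := List.map_congr_left (fun r _ => h r)
    _ = raw_input := List.map_id _

-- taking w characters of the tail at k is slicing row r at [colS k, colS k + w)
theorem take_tail (raw_input : List String) (k : Nat) (r : String) :
    PySem.Str.slice (PySem.Str.slice r (some ((colS raw_input k : Nat) : Int)) none)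
        none (some ((colW raw_input k : Nat) : Int))
      = PySem.Str.slice r (some ((colS raw_input k : Nat) : Int))
          (some (((colS raw_input k : Nat) : Int) + ((colW raw_input k : Nat) : Int))) := by
  apply String.toList_inj.1
  simp only [PySem.Str.toList_slice, PySem.Chars.slice_eq_listSlice]
  rw [PySem.List.slice_from_natCast, PySem.List.slice_to_natCast,
    PySem.List.slice_natCast_add]

-- dropping w+1 characters of the tail at k yields the tail at k+1
theorem drop_tail (raw_input : List String) (k : Nat) (r : String) :
    PySem.Str.slice (PySem.Str.slice r (some ((colS raw_input k : Nat) : Int)) none)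
        (some (((colW raw_input k : Nat) : Int) + 1)) none
      = PySem.Str.slice r (some ((colS raw_input (k + 1) : Nat) : Int)) none := by
  apply String.toList_inj.1
  simp only [PySem.Str.toList_slice, PySem.Chars.slice_eq_listSlice]
  rw [PySem.List.slice_from_natCast]
  rw [show ((colW raw_input k : Nat) : Int) + 1 = ((colW raw_input k + 1 : Nat) : Int) by
    push_cast; ring]
  rw [PySem.List.slice_from_natCast, PySem.List.slice_from_natCast, List.drop_drop]
  congr 1

-- B's peel loop invariant: after m peeled columns, the output holds the first m
-- column cells and the tails are the rows with their first colS m characters removed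
theorem B_loop (raw_input : List String) :
    ∀ (m : Nat),
    (((List.range m).map (fun j => colW raw_input j)).foldl
      (fun (st : List (List String) × List String) (w : Nat) =>
        (st.1 ++ [st.2.map (fun t => PySem.Str.slice t none (some (w : Int)))],
         st.2.map (fun t => PySem.Str.slice t (some ((w : Int) + 1)) none)))
      ([], raw_input))
    = ((List.range m).map (fun c =>
        raw_input.map (fun r =>
          PySem.Str.slice r (some ((colS raw_input c : Nat) : Int))
            (some (((colS raw_input c : Nat) : Int)
              + ((colW raw_input c : Nat) : Int))))),
       tailsAt raw_input m) := by
  intro m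
  induction m with
  | zero => simp [tailsAt_zero]
  | succ m ih =>
    rw [List.range_succ, List.map_append, List.foldl_append, ih]
    simp only [List.map_append, List.map_cons, List.map_nil, List.foldl_cons,
      List.foldl_nil, Prod.mk.injEq]
    constructor
    · congr 1
      congr 1
      unfold tailsAt
      rw [List.map_map]
      apply List.map_congr_left
      intro r _
      exact take_tail raw_input m r
    · unfold tailsAt
      rw [List.map_map]
      apply List.map_congr_left
      intro r _
      exact drop_tail raw_input m r

theorem A_canon (raw_input : List String) (h : Pre_parse_rows raw_input) :
    parse_rows raw_input = canon raw_input := by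
  simp only [parse_rows]
  rw [A_loop raw_input h _ le_rfl]
  unfold canon
  apply List.map_congr_left
  intro c hc
  simp only [List.mem_range] at hc
  rw [if_pos hc]

theorem B_canon (raw_input : List String) (h : Pre_parse_rows raw_input) :
    parse_rows_alt raw_input = canon raw_input := by
  simp only [parse_rows_alt]
  cases hdl : raw_input.dropLast with
  | nil =>
    obtain ⟨-, h1, -⟩ := h
    have hn := h1 hdl
    unfold canon
    rw [hn]
    simp
  | cons r0 rest =>
    rw [widths_take raw_input h r0 rest hdl]
    rw [B_loop raw_input ((PySem.Str.split₀ (raw_input.headD "")).length)]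
    rfl

theorem parse_rows_spec : Claim_equal_parse_rows := by
  intro raw_input _ hpre
  unfold Spec_parse_rows
  rw [A_canon raw_input hpre, B_canon raw_input hpre]
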